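-- pv_equiv track=rewrite | github.com/MrBrantCode/unitest_baseline | mut_generate/mist_train_cf/cf_70207/solution.py | find_max_subset
-- ===== SOURCE A (Python) =====
-- from collections import defaultdict
-- from typing import List, Tuple
--
-- def find_max_subset(text: str) -> Tuple[str, int, List[Tuple[int, int]]]:
--     n = len(text)
--     count_dict = defaultdict(list)
--     max_len = 0
--     max_str = ""
--
--     for i in range(n):
--         temp_str = ""
--         for j in range(i, n):
--             temp_str += text[j]
--             count_dict[temp_str].append((i, j))
--             if len(temp_str) > max_len:
--                 max_len = len(temp_str)
--                 max_str = temp_str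
--
--     max_subset = max_str
--     occurrence = len(count_dict[max_str])
--     ranges = count_dict[max_str]
--     return max_subset, occurrence, ranges
-- ===== SOURCE B (Python) =====
-- def find_max_subset(text):
--     # The longest substring of text is text itself, occurring exactly once,
--     # at positions (0, n-1); empty text has no substrings at all.
--     n = len(text)
--     if n == 0:
--         return ("", 0, [])
--     return (text, 1, [(0, n - 1)])
-- ===== Notes on version B (the rewrite author's own statement) =====
-- stated objective: faster
-- what changed: Replaced the cubic enumeration of all substrings with a constant-time closed form: the longest substring is always the whole string, occurring once at (0, n-1), and the empty string yields ("", 0, []).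
import Mathlib
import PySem

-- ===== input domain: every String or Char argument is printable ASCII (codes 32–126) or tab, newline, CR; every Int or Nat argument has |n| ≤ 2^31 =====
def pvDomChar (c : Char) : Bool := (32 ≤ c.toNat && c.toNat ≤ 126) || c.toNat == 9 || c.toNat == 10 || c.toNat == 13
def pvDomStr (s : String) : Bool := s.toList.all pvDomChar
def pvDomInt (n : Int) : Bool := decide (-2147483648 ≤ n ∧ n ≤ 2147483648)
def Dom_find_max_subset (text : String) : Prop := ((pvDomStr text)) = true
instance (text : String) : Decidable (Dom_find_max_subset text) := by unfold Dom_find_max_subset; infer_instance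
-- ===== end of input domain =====

-- B replaces A's cubic enumeration of all substrings by the closed form
-- (text, 1, [(0, n-1)]) (("", 0, []) for empty text); objective: faster.


-- ===== PORT A =====
-- inner loop `for j in range(i, n): temp_str += text[j]; count_dict[temp_str].append((i, j)); if len(temp_str) > max_len: …`,
-- iterated over the suffix of characters starting at index j; state = (count_dict, max_len, max_str);
-- `count_dict[temp_str].append(p)` on a defaultdict(list) is Dict.modify with default []
def fmsInner (i : Nat) : Nat → List Char → List Char →
    PySem.Dict (List Char) (List (Int × Int)) → Nat → List Char →
    PySem.Dict (List Char) (List (Int × Int)) × Nat × List Char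
  | _, [], _, d, ml, ms => (d, ml, ms)
  | j, c :: rest, temp, d, ml, ms =>
    let temp' := temp ++ [c]
    let d' := d.modify temp' [] (fun v => v ++ [((i : Int), (j : Int))])
    if temp'.length > ml then
      fmsInner i (j + 1) rest temp' d' temp'.length temp'
    else
      fmsInner i (j + 1) rest temp' d' ml ms

-- outer loop `for i in range(n)`, temp_str reset to "" each iteration
def fmsOuter (cs : List Char) (i : Nat)
    (d : PySem.Dict (List Char) (List (Int × Int))) (ml : Nat) (ms : List Char) :
    PySem.Dict (List Char) (List (Int × Int)) × Nat × List Char :=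
  if h : i < cs.length then
    let st := fmsInner i i (cs.drop i) [] d ml ms
    fmsOuter cs (i + 1) st.1 st.2.1 st.2.2
  else (d, ml, ms)
termination_by cs.length - i

def find_max_subset (text : String) : String × Int × (List (Int × Int)) :=
  let cs := text.toList
  let st := fmsOuter cs 0 PySem.Dict.empty 0 []
  let ranges := st.1.getD st.2.2 []
  (String.ofList st.2.2, (ranges.length : Int), ranges)

-- ===== PORT B =====
def find_max_subset_alt (text : String) : String × Int × (List (Int × Int)) :=
  let n := PySem.Str.len text
  if n = 0 then ("", 0, [])
  else (text, 1, [(0, n - 1)])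

-- ===== PRECONDITION & SPEC =====
def Spec_find_max_subset (text : String) (out : String × Int × (List (Int × Int))) : Prop := out = find_max_subset_alt text
instance (text : String) (out : String × Int × (List (Int × Int))) : Decidable (Spec_find_max_subset text out) := by unfold Spec_find_max_subset; infer_instance

-- ===== CLAIM (what is proved, stated in full; the proofs are below) =====
def Claim_equal_find_max_subset : Prop := ∀ (text : String), Dom_find_max_subset text → Spec_find_max_subset text (find_max_subset text)

-- ===== LEMMAS AND PROOFS =====

-- the inner loop's effect on (max_len, max_str): it ends at the full suffix temp ++ suffix,
-- which beats ml iff it is longer (and the loop ran at all)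
lemma fmsInner_snd (i : Nat) : ∀ (suffix : List Char) (j : Nat) (temp : List Char)
    (d : PySem.Dict (List Char) (List (Int × Int))) (ml : Nat) (ms : List Char),
    (fmsInner i j suffix temp d ml ms).2 =
      (if ml < temp.length + suffix.length ∧ suffix ≠ [] then temp.length + suffix.length else ml,
       if ml < temp.length + suffix.length ∧ suffix ≠ [] then temp ++ suffix else ms) := by
  intro suffix
  induction suffix with
  | nil => intro j temp d ml ms; simp [fmsInner]
  | cons c rest ih =>
    intro j temp d ml ms
    simp only [fmsInner]
    split
    case isTrue h =>
      rw [ih]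
      cases rest with
      | nil => simp at h ⊢; omega
      | cons b bs =>
        simp only [List.length_append, List.length_cons, List.length_nil, ne_eq,
          List.cons_ne_nil, not_false_eq_true, and_true, List.append_assoc, List.cons_append,
          List.nil_append] at h ⊢
        have c1 : temp.length + (0 + 1) < temp.length + (0 + 1) + (bs.length + 1) := by omega
        have c2 : ml < temp.length + (bs.length + 1 + 1) := by omega
        rw [if_pos c1, if_pos c1, if_pos c2, if_pos c2]
        simp only [Prod.mk.injEq]
        exact ⟨by omega, trivial⟩
    case isFalse h =>
      rw [ih]
      cases rest with
      | nil => simp at h ⊢; omega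
      | cons b bs =>
        simp only [List.length_append, List.length_cons, List.length_nil, ne_eq,
          List.cons_ne_nil, not_false_eq_true, and_true, List.append_assoc, List.cons_append,
          List.nil_append] at h ⊢
        have e : temp.length + (0 + 1) + (bs.length + 1) = temp.length + (bs.length + 1 + 1) := by omega
        rw [e]

-- the inner loop's effect on the dict entry of the FULL string cs: the key cs is touched
-- exactly by the last step of the i = 0 iteration, which appends (0, n-1)
lemma fmsInner_getD (cs : List Char) (i : Nat) : ∀ (suffix : List Char) (j : Nat) (temp : List Char)
    (d : PySem.Dict (List Char) (List (Int × Int))) (ml : Nat) (ms : List Char),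
    temp ++ suffix = cs.drop i → j = i + temp.length →
    (fmsInner i j suffix temp d ml ms).1.getD cs [] =
      (if i = 0 ∧ suffix ≠ [] then d.getD cs [] ++ [((0 : Int), ((cs.length - 1 : Nat) : Int))]
       else d.getD cs []) := by
  intro suffix
  induction suffix with
  | nil => intro j temp d ml ms _ _; simp [fmsInner]
  | cons c rest ih =>
    intro j temp d ml ms hdec hj
    have hnnil : cs.drop i ≠ [] := by rw [← hdec]; simp
    have hile : i < cs.length := by
      by_contra hgt
      exact hnnil (List.drop_eq_nil_of_le (by omega))
    have hlen : temp.length + 1 + rest.length + i = cs.length := by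
      have := congrArg List.length hdec
      simp [List.length_drop] at this
      omega
    have hrec : (temp ++ [c]) ++ rest = cs.drop i := by
      rw [← hdec]; simp
    have hjrec : j + 1 = i + (temp ++ [c]).length := by simp; omega
    simp only [fmsInner]
    have key : ∀ ml₂ ms₂,
        (fmsInner i (j + 1) rest (temp ++ [c])
          (d.modify (temp ++ [c]) [] (fun v => v ++ [((i : Int), (j : Int))])) ml₂ ms₂).1.getD cs []
        = (if i = 0 ∧ rest ≠ [] then
            (d.modify (temp ++ [c]) [] (fun v => v ++ [((i : Int), (j : Int))])).getD cs [] ++ [((0 : Int), ((cs.length - 1 : Nat) : Int))]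
          else (d.modify (temp ++ [c]) [] (fun v => v ++ [((i : Int), (j : Int))])).getD cs []) := by
      intro ml₂ ms₂; exact ih (j + 1) (temp ++ [c]) _ ml₂ ms₂ hrec hjrec
    by_cases hi : i = 0
    · subst hi
      by_cases hr : rest = []
      · subst hr
        have hcs : cs = temp ++ [c] := by simpa using hdec.symm
        split <;>
        · rw [key]
          rw [if_neg (by simp), if_pos ⟨rfl, by simp⟩]
          rw [hcs, PySem.Dict.getD_modify_self]
          have hjj : (temp ++ [c]).length - 1 = j := by simp; omega
          rw [hjj]
          simp
      · have hne : cs ≠ temp ++ [c] := by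
          intro h
          have := congrArg List.length h
          simp at this
          have : rest.length = 0 := by omega
          exact hr (List.eq_nil_of_length_eq_zero this)
        split <;>
        · rw [key]
          rw [if_pos ⟨rfl, hr⟩, if_pos ⟨rfl, by simp⟩]
          rw [PySem.Dict.getD_modify, if_neg hne]
    · have hne : cs ≠ temp ++ [c] := by
        intro h
        have := congrArg List.length h
        simp at this
        omega
      split <;>
      · rw [key]
        rw [if_neg (by tauto), if_neg (by tauto)]
        rw [PySem.Dict.getD_modify, if_neg hne]

-- from i ≥ 1 on: the suffixes are shorter than cs, so (max_len, max_str) = (cs.length, cs)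
-- is never beaten and the entry of key cs is never touched again
lemma fmsOuter_high (cs : List Char) : ∀ (k i : Nat), cs.length - i = k → 1 ≤ i →
    ∀ (d : PySem.Dict (List Char) (List (Int × Int))),
    (fmsOuter cs i d cs.length cs).2 = (cs.length, cs) ∧
    (fmsOuter cs i d cs.length cs).1.getD cs [] = d.getD cs [] := by
  intro k
  induction k with
  | zero =>
    intro i hk hi d
    rw [fmsOuter, dif_neg (by omega)]
    exact ⟨rfl, rfl⟩
  | succ k ih =>
    intro i hk hi d
    rw [fmsOuter, dif_pos (by omega)]
    have hsnd := fmsInner_snd i (cs.drop i) i [] d cs.length cs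
    have hfst := fmsInner_getD cs i (cs.drop i) i [] d cs.length cs (by simp) (by simp)
    rw [if_neg (by simp; omega)] at hfst
    have hcond : ¬(cs.length < List.length ([] : List Char) + (cs.drop i).length ∧ cs.drop i ≠ []) := by
      simp only [List.length_nil, List.length_drop]; omega
    rw [if_neg hcond, if_neg hcond] at hsnd
    simp only [hsnd]
    have := ih (i + 1) (by omega) (by omega) (fmsInner i i (cs.drop i) [] d cs.length cs).1
    exact ⟨this.1, this.2.trans hfst⟩

lemma find_max_subset_eq_alt (text : String) : find_max_subset text = find_max_subset_alt text := by
  simp only [find_max_subset, find_max_subset_alt, PySem.Str.len]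
  by_cases hnil : text.toList = []
  · rw [fmsOuter, dif_neg (by simp [hnil])]
    have htext : text = "" := by
      rw [← String.ofList_toList (s := text), hnil]
    simp [htext]
  · have hpos : 0 < text.toList.length := List.length_pos_of_ne_nil hnil
    rw [fmsOuter, dif_pos (by omega)]
    simp only [List.drop_zero]
    have hsnd := fmsInner_snd 0 text.toList 0 [] PySem.Dict.empty 0 []
    have hfst := fmsInner_getD text.toList 0 text.toList 0 [] PySem.Dict.empty 0 []
      (by simp) (by simp)
    rw [if_pos ⟨rfl, hnil⟩, PySem.Dict.getD_empty] at hfst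
    have hc : (0 : Nat) < List.length ([] : List Char) + text.toList.length ∧ text.toList ≠ [] :=
      ⟨by simpa using hpos, hnil⟩
    rw [if_pos hc, if_pos hc] at hsnd
    simp only [List.length_nil, Nat.zero_add, List.nil_append] at hsnd
    simp only [hsnd]
    have hhigh := fmsOuter_high text.toList (text.toList.length - 1) 1 (by omega) (by omega)
      (fmsInner 0 0 text.toList [] PySem.Dict.empty 0 []).1
    rw [hhigh.1]
    simp only [hhigh.2, hfst, List.nil_append]
    have htext : text ≠ "" := fun h => hnil (by simp [h])
    have hpos' : 0 < text.length := by simpa using hpos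
    rw [if_neg (by simp [htext])]
    refine Prod.ext ?_ (Prod.ext ?_ ?_) <;> simp <;> omega

-- ===== VERDICT (by name: the statement is the Claim_ definition above) =====
theorem find_max_subset_spec : Claim_equal_find_max_subset := by
  intro text _
  unfold Spec_find_max_subset
  exact find_max_subset_eq_alt text
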